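-- pv_equiv track=rewrite | github.com/Peter7397/anylab | backend/ai_assistant/pdf_processor.py | _analyze_data_types
-- ===== SOURCE A (Python) =====
-- from typing import Dict, Any, List, Optional, Tuple
--
-- def _analyze_data_types(table: List[List[str]]) -> List[str]:
--     """Analyze data types in table columns"""
--     if not table:
--         return []
--
--     data_types = []
--     for col_index in range(len(table[0])):
--         column_data = [row[col_index] for row in table if col_index < len(row)]
--
--         # Analyze column data type
--         if all(cell.replace('.', '').replace(',', '').isdigit() for cell in column_data if cell):
--             data_types.append('numeric')
--         elif all(cell.lower() in ['true', 'false', 'yes', 'no'] for cell in column_data if cell):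
--             data_types.append('boolean')
--         else:
--             data_types.append('text')
--
--     return data_types
-- ===== SOURCE B (Python) =====
-- def _analyze_data_types(table):
--     """Classify each column as numeric/boolean/text in one row-major streaming pass."""
--     if not table:
--         return []
--     n = len(table[0])
--     is_numeric = [True] * n
--     is_boolean = [True] * n
--     for row in table:
--         for c in range(min(n, len(row))):
--             cell = row[c]
--             if cell:
--                 is_numeric[c] = is_numeric[c] and cell.replace('.', '').replace(',', '').isdigit()
--                 is_boolean[c] = is_boolean[c] and cell.lower() in ('true', 'false', 'yes', 'no')
--     return ['numeric' if is_numeric[c] else 'boolean' if is_boolean[c] else 'text'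
--             for c in range(n)]
-- ===== Notes on version B (the rewrite author's own statement) =====
-- stated objective: faster
-- what changed: Replaced the column-major collect-then-rescan (one list comprehension over all rows per column, plus two all() rescans) with a single row-major streaming pass maintaining per-column numeric/boolean flags.
import Mathlib
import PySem

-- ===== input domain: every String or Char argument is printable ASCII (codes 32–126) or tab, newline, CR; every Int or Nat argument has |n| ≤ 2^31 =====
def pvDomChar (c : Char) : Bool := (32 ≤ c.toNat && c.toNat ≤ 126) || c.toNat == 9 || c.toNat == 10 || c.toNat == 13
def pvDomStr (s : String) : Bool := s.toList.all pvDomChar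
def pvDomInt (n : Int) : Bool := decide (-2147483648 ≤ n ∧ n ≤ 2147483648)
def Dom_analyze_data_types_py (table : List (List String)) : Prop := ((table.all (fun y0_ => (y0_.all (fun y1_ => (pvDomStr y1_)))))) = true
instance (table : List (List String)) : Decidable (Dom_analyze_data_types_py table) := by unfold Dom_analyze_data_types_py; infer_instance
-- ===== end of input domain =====

-- B replaces A's column-major collect-then-rescan with one row-major streaming pass over per-column flags (objective: faster, constant-factor).

-- cell.replace('.','').replace(',','').isdigit()
def numericCell (cell : String) : Bool :=
  PySem.Str.strIsdigit (PySem.Str.replace (PySem.Str.replace cell "." "") "," "")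

-- cell.lower() in ['true','false','yes','no']
def booleanCell (cell : String) : Bool :=
  ["true", "false", "yes", "no"].contains (PySem.Str.lower cell)

-- ===== PORT A =====
def analyze_data_types_py (table : List (List String)) : List String :=
  if table = [] then []
  else
    (List.range (table.headD []).length).foldl
      (fun data_types col_index =>
        let column_data := table.filterMap (fun row => row[col_index]?)
        if column_data.all (fun cell => cell == "" || numericCell cell) then
          data_types ++ ["numeric"]
        else if column_data.all (fun cell => cell == "" || booleanCell cell) then
          data_types ++ ["boolean"]
        else
          data_types ++ ["text"])
      []

-- ===== PORT B =====
def bStep (flags : List (Bool × Bool)) (row : List String) : List (Bool × Bool) :=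
  flags.mapIdx (fun c p =>
    match row[c]? with
    | some cell => if cell == "" then p else (p.1 && numericCell cell, p.2 && booleanCell cell)
    | none => p)

def analyze_data_types_py_alt (table : List (List String)) : List String :=
  match table with
  | [] => []
  | first :: _ =>
    let flags := table.foldl bStep (List.replicate first.length (true, true))
    flags.map (fun p => if p.1 then "numeric" else if p.2 then "boolean" else "text")

-- ===== PRECONDITION & SPEC =====
def Spec_analyze_data_types_py (table : List (List String)) (out : List String) : Prop := out = analyze_data_types_py_alt table
instance (table : List (List String)) (out : List String) : Decidable (Spec_analyze_data_types_py table out) := by unfold Spec_analyze_data_types_py; infer_instance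

-- ===== CLAIM (what is proved, stated in full; the proofs are below) =====
def Claim_equal_analyze_data_types_py : Prop := ∀ (table : List (List String)), Dom_analyze_data_types_py table → Spec_analyze_data_types_py table (analyze_data_types_py table)

-- ===== LEMMAS AND PROOFS =====

-- column-wise "all rows pass f (skipping blank / missing cells)"
def colAll (table : List (List String)) (c : Nat) (f : String → Bool) : Bool :=
  table.all (fun row => match row[c]? with
    | some cell => cell == "" || f cell
    | none => true)

theorem all_filterMap_get (table : List (List String)) (c : Nat) (f : String → Bool) :
    (table.filterMap (fun row => row[c]?)).all (fun cell => cell == "" || f cell)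
      = colAll table c f := by
  induction table with
  | nil => rfl
  | cons r rs ih =>
    simp only [List.filterMap_cons, colAll, List.all_cons] at *
    cases h : r[c]? with
    | none => simpa [h, colAll] using ih
    | some cell => simp [List.all_cons] at ih ⊢; rw [ih]

theorem foldl_append_map (l : List Nat) (g : Nat → String) (acc : List String) :
    l.foldl (fun acc c => acc ++ [g c]) acc = acc ++ l.map g := by
  induction l generalizing acc with
  | nil => simp
  | cons x xs ih => simp [List.foldl_cons, ih]

theorem length_bStep (flags : List (Bool × Bool)) (row : List String) :
    (bStep flags row).length = flags.length := by
  simp [bStep]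

theorem foldl_bStep_getElem (rows : List (List String)) (flags : List (Bool × Bool))
    (c : Nat) (hc : c < flags.length) :
    (rows.foldl bStep flags)[c]? =
      some ((flags[c].1 && colAll rows c numericCell, flags[c].2 && colAll rows c booleanCell)) := by
  induction rows generalizing flags with
  | nil =>
    simp [colAll, List.getElem?_eq_getElem hc]
  | cons r rs ih =>
    have hc' : c < (bStep flags r).length := by rw [length_bStep]; exact hc
    have := ih (bStep flags r) hc'
    have hstep : (bStep flags r)[c] =
        (match r[c]? with
         | some cell => if cell == "" then flags[c]
             else (flags[c].1 && numericCell cell, flags[c].2 && booleanCell cell)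
         | none => flags[c]) := by
      simp [bStep]
    rw [List.foldl_cons, this, hstep]
    cases h : r[c]? with
    | none => simp [colAll, h]
    | some cell =>
      by_cases hb : cell = ""
      · simp [colAll, h, hb]
      · have hbe : (cell == "") = false := by simpa using hb
        simp only [colAll, List.all_cons, h, hbe, Bool.false_or, if_neg (by decide : ¬ (false = true)), Option.some.injEq, Prod.mk.injEq]
        constructor <;> rw [Bool.and_assoc]

theorem length_foldl_bStep (rows : List (List String)) (flags : List (Bool × Bool)) :
    (rows.foldl bStep flags).length = flags.length := by
  induction rows generalizing flags with
  | nil => rfl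
  | cons r rs ih => rw [List.foldl_cons, ih, length_bStep]

theorem foldl_bStep_replicate (rows : List (List String)) (n : Nat) :
    rows.foldl bStep (List.replicate n (true, true)) =
      (List.range n).map (fun c => (colAll rows c numericCell, colAll rows c booleanCell)) := by
  apply List.ext_getElem?
  intro c
  by_cases hc : c < n
  · have hc' : c < (List.replicate n ((true : Bool), (true : Bool))).length := by
      simpa using hc
    rw [foldl_bStep_getElem rows _ c hc']
    simp [hc]
  · have h1 : (rows.foldl bStep (List.replicate n ((true : Bool), true))).length = n := by
      rw [length_foldl_bStep]; simp
    rw [List.getElem?_eq_none (by rw [h1]; omega), List.getElem?_eq_none (by simp; omega)]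

theorem analyze_data_types_py_spec : Claim_equal_analyze_data_types_py := by
  intro table _
  unfold Spec_analyze_data_types_py analyze_data_types_py analyze_data_types_py_alt
  cases table with
  | nil => rfl
  | cons first rest =>
    simp only [if_neg (List.cons_ne_nil first rest), List.headD_cons]
    have hf : (fun (data_types : List String) (col_index : Nat) =>
        if ((first :: rest).filterMap (fun row => row[col_index]?)).all
            (fun cell => cell == "" || numericCell cell) then data_types ++ ["numeric"]
        else if ((first :: rest).filterMap (fun row => row[col_index]?)).all
            (fun cell => cell == "" || booleanCell cell) then data_types ++ ["boolean"]
        else data_types ++ ["text"])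
        = fun acc c => acc ++ [if colAll (first :: rest) c numericCell then "numeric"
            else if colAll (first :: rest) c booleanCell then "boolean" else "text"] := by
      funext acc c
      rw [all_filterMap_get, all_filterMap_get]
      split_ifs <;> rfl
    rw [hf, foldl_append_map, foldl_bStep_replicate, List.map_map, List.nil_append]
    apply List.map_congr_left
    intro c _
    rfl
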